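-- pv_equiv track=rewrite | github.com/gkreder/pipeline_scripts | aux/lib.py | vecEquals
-- ===== SOURCE A (Python) =====
-- def vecEquals(v1, v2):
-- 	atoms_1 = v1.keys()
-- 	atoms_2 = v2.keys()
--
-- 	for a in set(atoms_1).difference(set(atoms_2)):
-- 		if v1[a] > 0:
-- 			return False
-- 	for a in set(atoms_2).difference(set(atoms_1)):
-- 		if v2[a] > 0:
-- 			return False
-- 	for a in set(atoms_1).intersection(set(atoms_2)):
-- 		if v1[a] != v2[a]:
-- 			return False
-- 	return True
-- ===== SOURCE B (Python) =====
-- def vecEquals(v1, v2):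
-- 	xs = sorted(v1.items())
-- 	ys = sorted(v2.items())
-- 	i, j = 0, 0
-- 	while i < len(xs) and j < len(ys):
-- 		a, x = xs[i]
-- 		b, y = ys[j]
-- 		if a == b:
-- 			if x != y:
-- 				return False
-- 			i += 1
-- 			j += 1
-- 		elif a < b:
-- 			if x > 0:
-- 				return False
-- 			i += 1
-- 		else:
-- 			if y > 0:
-- 				return False
-- 			j += 1
-- 	return all(x <= 0 for _, x in xs[i:]) and all(y <= 0 for _, y in ys[j:])
-- ===== Notes on version B (the rewrite author's own statement) =====
-- stated objective: alternative
-- what changed: Replaces A's three hash-set scans (difference, reverse difference, intersection) with a sort-then-merge algorithm: both item lists are sorted by key and compared in one two-pointer merge pass, the leftovers checked for non-positivity.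
import Mathlib
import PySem

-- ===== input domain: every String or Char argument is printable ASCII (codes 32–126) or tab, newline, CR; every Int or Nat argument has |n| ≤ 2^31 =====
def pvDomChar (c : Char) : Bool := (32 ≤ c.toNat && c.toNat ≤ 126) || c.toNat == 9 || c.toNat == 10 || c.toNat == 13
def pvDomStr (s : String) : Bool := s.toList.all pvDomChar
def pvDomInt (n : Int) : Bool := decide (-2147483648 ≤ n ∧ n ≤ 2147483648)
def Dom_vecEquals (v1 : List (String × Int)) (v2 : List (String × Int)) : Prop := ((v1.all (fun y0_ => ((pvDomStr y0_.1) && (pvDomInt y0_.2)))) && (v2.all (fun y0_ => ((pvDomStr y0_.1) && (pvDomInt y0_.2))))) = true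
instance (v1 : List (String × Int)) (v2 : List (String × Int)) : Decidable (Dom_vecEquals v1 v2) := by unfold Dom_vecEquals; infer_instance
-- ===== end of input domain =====

-- B replaces A's three hash-set scans by sort-then-merge: sort both item lists by key and
-- compare them in one two-pointer merge pass; objective: alternative algorithm.

-- shared dict-lookup primitive: v[a] on the association list (first match; the ports only apply it where the key is present)
def pvGetD (v : List (String × Int)) (a : String) : Int :=
  match v.find? (fun p => p.1 == a) with
  | some p => p.2
  | none => 0

-- ===== PORT A =====
def vecEquals (v1 : List (String × Int)) (v2 : List (String × Int)) : Bool :=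
  let atoms1 := v1.map (·.1)
  let atoms2 := v2.map (·.1)
  let s1 := PySem.Set.ofList atoms1
  let s2 := PySem.Set.ofList atoms2
  -- for a in set(atoms_1).difference(set(atoms_2)): if v1[a] > 0: return False
  if (PySem.Set.diff s1 s2).any (fun a => decide (pvGetD v1 a > 0)) then false
  -- for a in set(atoms_2).difference(set(atoms_1)): if v2[a] > 0: return False
  else if (PySem.Set.diff s2 s1).any (fun a => decide (pvGetD v2 a > 0)) then false
  -- for a in set(atoms_1).intersection(set(atoms_2)): if v1[a] != v2[a]: return False
  else if (PySem.Set.inter s1 s2).any (fun a => !(pvGetD v1 a == pvGetD v2 a)) then false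
  else true

-- ===== PORT B =====
-- v.items() of the dict represented by the association list v: first binding of each key, in order
def pvItems : List (String × Int) → List (String × Int)
  | [] => []
  | (a, x) :: rest => (a, x) :: pvItems (rest.filter (fun p => !(p.1 == a)))
termination_by v => v.length
decreasing_by
  simp only [List.length_unattach, List.length_cons]
  exact Nat.lt_succ_of_le ((List.length_filter_le _ _).trans (by simp))

-- the two-pointer merge loop of Source B (the trailing 'all' checks are the leftover cases)
def pvMerge : List (String × Int) → List (String × Int) → Bool
  | [], ys => ys.all (fun q => decide (q.2 ≤ 0))
  | p :: xs, [] => (p :: xs).all (fun q => decide (q.2 ≤ 0))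
  | (a, x) :: xs, (b, y) :: ys =>
    if a = b then x == y && pvMerge xs ys
    else if a < b then decide (x ≤ 0) && pvMerge xs ((b, y) :: ys)
    else decide (y ≤ 0) && pvMerge ((a, x) :: xs) ys

-- sorted(v.items()): the keys are distinct, so Python's tuple sort is the stable sort by key
def vecEquals_alt (v1 : List (String × Int)) (v2 : List (String × Int)) : Bool :=
  pvMerge (PySem.List.sorted (pvItems v1) (fun p => p.1) false)
          (PySem.List.sorted (pvItems v2) (fun p => p.1) false)

-- ===== PRECONDITION & SPEC =====
def Spec_vecEquals (v1 : List (String × Int)) (v2 : List (String × Int)) (out : Bool) : Prop := out = vecEquals_alt v1 v2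
instance (v1 : List (String × Int)) (v2 : List (String × Int)) (out : Bool) : Decidable (Spec_vecEquals v1 v2 out) := by unfold Spec_vecEquals; infer_instance

-- ===== CLAIM (what is proved, stated in full; the proofs are below) =====
def Claim_equal_vecEquals : Prop := ∀ (v1 : List (String × Int)) (v2 : List (String × Int)), Dom_vecEquals v1 v2 → Spec_vecEquals v1 v2 (vecEquals v1 v2)

-- ===== LEMMAS AND PROOFS =====

-- the characterisation both programs decide, phrased over two item lists
def pvCond (xs ys : List (String × Int)) : Prop :=
  (∀ p ∈ xs, (∀ q ∈ ys, q.1 = p.1 → p.2 = q.2) ∧ ((∀ q ∈ ys, q.1 ≠ p.1) → p.2 ≤ 0)) ∧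
  (∀ q ∈ ys, (∀ p ∈ xs, p.1 ≠ q.1) → q.2 ≤ 0)

-- normalises the attach/unattach noise in pvItems.induct hypotheses
theorem pvItems_attach_eq (a : String) (rest : List (String × Int)) :
    (List.filter (fun x : {x // x ∈ rest} => match x with | ⟨p, _⟩ => !p.1 == a) rest.attach).unattach
      = rest.filter (fun p => !(p.1 == a)) :=
  (List.unattach_filter (hf := fun x h => rfl)).trans
    (by rw [List.unattach_attach]; apply List.filter_congr; intro x _; cases h : x.1 == a <;> rfl)

theorem find?_congr_mem {α : Type} (l : List α) (f g : α → Bool)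
    (h : ∀ x ∈ l, f x = g x) : l.find? f = l.find? g := by
  induction l with
  | nil => rfl
  | cons a l ih =>
    simp only [List.find?_cons, h a (List.mem_cons_self)]
    cases g a <;> simp [ih fun x hx => h x (List.mem_cons_of_mem _ hx)]

theorem mem_pvItems (v : List (String × Int)) (p : String × Int) :
    p ∈ pvItems v ↔ v.find? (fun q => q.1 == p.1) = some p := by
  induction v using pvItems.induct with
  | case1 => simp [pvItems]
  | case2 a x rest ih =>
    rw [pvItems_attach_eq] at ih
    rw [pvItems]
    rw [List.find?_filter] at ih
    by_cases h : a = p.1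
    · have hhead : ((a, x).1 == p.1) = true := by simp [h]
      simp only [List.mem_cons, List.find?_cons, hhead]
      constructor
      · rintro (h' | h')
        · rw [h']
        · exfalso
          have hf := List.find?_some (ih.mp h')
          simp [h] at hf
      · intro h'
        exact Or.inl (Option.some_inj.mp h').symm
    · have hfind : rest.find? (fun q => decide ((!(q.1 == a)) = true ∧ (q.1 == p.1) = true))
          = rest.find? (fun q => q.1 == p.1) := by
        apply find?_congr_mem
        intro q _
        by_cases hq : q.1 = p.1
        · simp only [hq]
          have hpa : ¬(p.1 = a) := fun hh => h hh.symm
          simp [hpa]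
        · simp [hq]
      rw [hfind] at ih
      simp only [List.mem_cons, List.find?_cons, show ((a, x).1 == p.1) = false by simpa using h]
      rw [ih]
      constructor
      · rintro (h' | h')
        · exact absurd (congrArg Prod.fst h').symm h
        · exact h'
      · exact Or.inr

theorem mem_of_mem_pvItems (v : List (String × Int)) (p : String × Int)
    (h : p ∈ pvItems v) : p ∈ v :=
  List.mem_of_find?_eq_some ((mem_pvItems v p).mp h)

theorem keys_pvItems (v : List (String × Int)) (a : String) :
    (∃ p ∈ pvItems v, p.1 = a) ↔ a ∈ v.map (·.1) := by
  constructor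
  · rintro ⟨p, hp, rfl⟩
    exact List.mem_map.mpr ⟨p, mem_of_mem_pvItems v p hp, rfl⟩
  · intro h
    obtain ⟨p, hp, rfl⟩ := List.mem_map.mp h
    have hs : (v.find? (fun q => q.1 == p.1)).isSome := by
      rw [List.find?_isSome]; exact ⟨p, hp, by simp⟩
    obtain ⟨q, hq⟩ := Option.isSome_iff_exists.mp hs
    have hq1 : q.1 = p.1 := by simpa using List.find?_some hq
    exact ⟨q, (mem_pvItems v q).mpr (by rwa [hq1]), hq1⟩

theorem getD_pvItems (v : List (String × Int)) (p : String × Int) (h : p ∈ pvItems v) :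
    pvGetD v p.1 = p.2 := by
  unfold pvGetD
  rw [(mem_pvItems v p).mp h]

theorem nodupKeys_pvItems (v : List (String × Int)) :
    (pvItems v).Pairwise (fun p q => p.1 ≠ q.1) := by
  induction v using pvItems.induct with
  | case1 => simp [pvItems]
  | case2 a x rest ih =>
    rw [pvItems_attach_eq] at ih
    rw [pvItems]
    refine List.Pairwise.cons ?_ ih
    intro q hq
    have hmem := mem_of_mem_pvItems _ _ hq
    simp only [List.mem_filter] at hmem
    intro hh
    rw [show (a, x).1 = a from rfl] at hh
    simp [hh] at hmem

theorem merge_iff (xs ys : List (String × Int))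
    (hx : xs.Pairwise (fun p q => p.1 < q.1)) (hy : ys.Pairwise (fun p q => p.1 < q.1)) :
    pvMerge xs ys = true ↔ pvCond xs ys := by
  induction xs, ys using pvMerge.induct with
  | case1 ys => simp [pvMerge, pvCond]
  | case2 p xs => simp [pvMerge, pvCond]
  | case3 x xs b y ys ih =>
    obtain ⟨ha, hx'⟩ := List.pairwise_cons.mp hx
    obtain ⟨hb, hy'⟩ := List.pairwise_cons.mp hy
    rw [pvMerge]
    simp only [if_true, Bool.and_eq_true, beq_iff_eq, ih hx' hy', pvCond]
    constructor
    · rintro ⟨hxy, h1, h2⟩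
      refine ⟨?_, ?_⟩
      · intro p hp0
        rcases List.mem_cons.mp hp0 with rfl | hp
        · refine ⟨?_, fun hno => absurd rfl (hno (b, y) List.mem_cons_self)⟩
          intro q hq0 h
          rcases List.mem_cons.mp hq0 with rfl | hq
          · exact hxy
          · exact absurd h (ne_of_gt (hb q hq))
        · refine ⟨?_, fun hno => (h1 p hp).2 fun q hq => hno q (List.mem_cons_of_mem _ hq)⟩
          intro q hq0 h
          rcases List.mem_cons.mp hq0 with rfl | hq
          · exact absurd h (ne_of_lt (ha p hp))
          · exact (h1 p hp).1 q hq h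
      · intro q hq0 hno
        rcases List.mem_cons.mp hq0 with rfl | hq
        · exact absurd rfl (hno (b, x) List.mem_cons_self)
        · exact h2 q hq fun p hp => hno p (List.mem_cons_of_mem _ hp)
    · rintro ⟨h1, h2⟩
      have hxy := (h1 (b, x) List.mem_cons_self).1 (b, y) List.mem_cons_self rfl
      refine ⟨hxy, ?_, ?_⟩
      · intro p hp
        obtain ⟨c1, c2⟩ := h1 p (List.mem_cons_of_mem _ hp)
        refine ⟨fun q hq h => c1 q (List.mem_cons_of_mem _ hq) h, fun hno => c2 ?_⟩
        intro q hq0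
        rcases List.mem_cons.mp hq0 with rfl | hq
        · exact ne_of_lt (ha p hp)
        · exact hno q hq
      · intro q hq hno
        refine h2 q (List.mem_cons_of_mem _ hq) ?_
        intro p hp0
        rcases List.mem_cons.mp hp0 with rfl | hp
        · exact ne_of_lt (hb q hq)
        · exact hno p hp
  | case4 a x xs b y ys hab hlt ih =>
    obtain ⟨ha, hx'⟩ := List.pairwise_cons.mp hx
    obtain ⟨hb, hy'⟩ := List.pairwise_cons.mp hy
    rw [pvMerge]
    simp only [if_neg hab, if_pos hlt, Bool.and_eq_true, decide_eq_true_eq, ih hx' hy, pvCond]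
    have haq : ∀ q ∈ (b, y) :: ys, q.1 ≠ a := by
      intro q hq0
      rcases List.mem_cons.mp hq0 with rfl | hq
      · exact fun h => hab h.symm
      · exact ne_of_gt (lt_trans hlt (hb q hq))
    constructor
    · rintro ⟨hx0, h1, h2⟩
      refine ⟨?_, ?_⟩
      · intro p hp0
        rcases List.mem_cons.mp hp0 with rfl | hp
        · exact ⟨fun q hq h => absurd h (haq q hq), fun _ => hx0⟩
        · exact h1 p hp
      · intro q hq hno
        exact h2 q hq fun p hp => hno p (List.mem_cons_of_mem _ hp)
    · rintro ⟨h1, h2⟩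
      refine ⟨(h1 (a, x) List.mem_cons_self).2 (fun q hq => haq q hq), ?_, ?_⟩
      · intro p hp
        exact h1 p (List.mem_cons_of_mem _ hp)
      · intro q hq hno
        refine h2 q hq ?_
        intro p hp0
        rcases List.mem_cons.mp hp0 with rfl | hp
        · exact Ne.symm (haq q hq)
        · exact hno p hp
  | case5 a x xs b y ys hab hlt ih =>
    obtain ⟨ha, hx'⟩ := List.pairwise_cons.mp hx
    obtain ⟨hb, hy'⟩ := List.pairwise_cons.mp hy
    have hba : b < a := by
      rcases lt_trichotomy a b with h | h | h
      · exact absurd h hlt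
      · exact absurd h hab
      · exact h
    rw [pvMerge]
    simp only [if_neg hab, if_neg hlt, Bool.and_eq_true, decide_eq_true_eq, ih hx hy', pvCond]
    have hbp : ∀ p ∈ (a, x) :: xs, p.1 ≠ b := by
      intro p hp0
      rcases List.mem_cons.mp hp0 with rfl | hp
      · exact hab
      · exact ne_of_gt (lt_trans hba (ha p hp))
    constructor
    · rintro ⟨hy0, h1, h2⟩
      refine ⟨?_, ?_⟩
      · intro p hp
        obtain ⟨c1, c2⟩ := h1 p hp
        refine ⟨?_, fun hno => c2 fun q hq => hno q (List.mem_cons_of_mem _ hq)⟩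
        intro q hq0 h
        rcases List.mem_cons.mp hq0 with rfl | hq
        · exact absurd h (Ne.symm (hbp p hp))
        · exact c1 q hq h
      · intro q hq0 hno
        rcases List.mem_cons.mp hq0 with rfl | hq
        · exact hy0
        · exact h2 q hq hno
    · rintro ⟨h1, h2⟩
      refine ⟨h2 (b, y) List.mem_cons_self (fun p hp => hbp p hp), ?_, ?_⟩
      · intro p hp
        obtain ⟨c1, c2⟩ := h1 p hp
        refine ⟨fun q hq h => c1 q (List.mem_cons_of_mem _ hq) h, fun hno => c2 ?_⟩
        intro q hq0
        rcases List.mem_cons.mp hq0 with rfl | hq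
        · exact Ne.symm (hbp p hp)
        · exact hno q hq
      · intro q hq hno
        exact h2 q (List.mem_cons_of_mem _ hq) hno

-- pvCond over the sorted lists is pvCond over the item lists (it only quantifies membership)
theorem pvCond_sorted (v1 v2 : List (String × Int)) :
    pvCond (PySem.List.sorted (pvItems v1) (fun p => p.1) false)
           (PySem.List.sorted (pvItems v2) (fun p => p.1) false) ↔
    pvCond (pvItems v1) (pvItems v2) := by
  unfold pvCond
  simp only [PySem.List.mem_sorted]

theorem sorted_pairwise_lt (v : List (String × Int)) :
    (PySem.List.sorted (pvItems v) (fun p => p.1) false).Pairwise (fun p q => p.1 < q.1) := by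
  have hle := PySem.List.sorted_pairwise (xs := pvItems v) (key := fun p => p.1)
  have hnd : (PySem.List.sorted (pvItems v) (fun p => p.1) false).Pairwise
      (fun p q => p.1 ≠ q.1) :=
    (PySem.List.sorted_perm (xs := pvItems v) (key := fun p => p.1) (rev := false)).symm.pairwise
      (nodupKeys_pvItems v) (fun {p q} h => Ne.symm h)
  exact (hle.and hnd).imp fun h => lt_of_le_of_ne h.1 h.2

theorem B_iff (v1 v2 : List (String × Int)) :
    vecEquals_alt v1 v2 = true ↔ pvCond (pvItems v1) (pvItems v2) := by
  unfold vecEquals_alt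
  rw [merge_iff _ _ (sorted_pairwise_lt v1) (sorted_pairwise_lt v2), pvCond_sorted]

theorem getD_mem_pvItems (v : List (String × Int)) (x : String) (h : x ∈ v.map (·.1)) :
    (x, pvGetD v x) ∈ pvItems v := by
  obtain ⟨p, hp, hp1⟩ := (keys_pvItems v x).mpr h
  have hg := getD_pvItems v p hp
  rw [← hp1, hg]
  exact hp

theorem A_iff (v1 v2 : List (String × Int)) :
    vecEquals v1 v2 = true ↔ pvCond (pvItems v1) (pvItems v2) := by
  unfold vecEquals
  simp only [List.any_eq_true, PySem.Set.mem_diff, PySem.Set.mem_inter, PySem.Set.mem_ofList,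
    List.mem_map, Bool.if_false_left, Bool.if_true_right, Bool.and_eq_true,
    Bool.not_eq_true', decide_eq_false_iff_not, decide_eq_true_eq, Bool.or_false,
    beq_eq_false_iff_ne, ne_eq, pvCond]
  constructor
  · rintro ⟨h1, h2, h3⟩
    constructor
    · intro p hp
      have hpv : p ∈ v1 := mem_of_mem_pvItems v1 p hp
      have hk1 : ∃ a ∈ v1, a.1 = p.1 := ⟨p, hpv, rfl⟩
      have hgp : pvGetD v1 p.1 = p.2 := getD_pvItems v1 p hp
      constructor
      · intro q hq h
        have hqv : q ∈ v2 := mem_of_mem_pvItems v2 q hq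
        have hgq : pvGetD v2 q.1 = q.2 := getD_pvItems v2 q hq
        by_contra hne
        exact h3 ⟨p.1, ⟨hk1, ⟨q, hqv, h⟩⟩, by rw [hgp, ← h, hgq]; exact hne⟩
      · intro hno
        have hnk2 : ¬∃ a ∈ v2, a.1 = p.1 := by
          rintro ⟨a, ha, hae⟩
          have hm : p.1 ∈ v2.map (·.1) := List.mem_map.mpr ⟨a, ha, hae⟩
          obtain ⟨q, hq, hq1⟩ := (keys_pvItems v2 p.1).mpr hm
          exact hno q hq hq1
        by_contra hpos
        exact h1 ⟨p.1, ⟨hk1, hnk2⟩, by rw [hgp]; omega⟩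
    · intro q hq hno
      have hqv : q ∈ v2 := mem_of_mem_pvItems v2 q hq
      have hgq : pvGetD v2 q.1 = q.2 := getD_pvItems v2 q hq
      have hnk1 : ¬∃ a ∈ v1, a.1 = q.1 := by
        rintro ⟨a, ha, hae⟩
        have hm : q.1 ∈ v1.map (·.1) := List.mem_map.mpr ⟨a, ha, hae⟩
        obtain ⟨p, hp, hp1⟩ := (keys_pvItems v1 q.1).mpr hm
        exact hno p hp hp1
      by_contra hpos
      exact h2 ⟨q.1, ⟨⟨q, hqv, rfl⟩, hnk1⟩, by rw [hgq]; omega⟩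
  · rintro ⟨c1, c2⟩
    refine ⟨?_, ?_, ?_⟩
    · rintro ⟨x, ⟨hk1, hnk2⟩, hpos⟩
      have hm1 : x ∈ v1.map (·.1) := List.mem_map.mpr hk1
      have hp := getD_mem_pvItems v1 x hm1
      have hle := (c1 _ hp).2 (fun q hq h' => hnk2 ⟨q, mem_of_mem_pvItems _ _ hq, h'⟩)
      simp only at hle
      omega
    · rintro ⟨x, ⟨hk2, hnk1⟩, hpos⟩
      have hm2 : x ∈ v2.map (·.1) := List.mem_map.mpr hk2
      have hq := getD_mem_pvItems v2 x hm2
      have hle := c2 _ hq (fun p hp h' => hnk1 ⟨p, mem_of_mem_pvItems _ _ hp, h'⟩)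
      simp only at hle
      omega
    · rintro ⟨x, ⟨hk1, hk2⟩, hne⟩
      have hp := getD_mem_pvItems v1 x (List.mem_map.mpr hk1)
      have hq := getD_mem_pvItems v2 x (List.mem_map.mpr hk2)
      have heq := (c1 _ hp).1 _ hq rfl
      simp only at heq
      exact hne heq

theorem vecEquals_eq_alt (v1 v2 : List (String × Int)) : vecEquals v1 v2 = vecEquals_alt v1 v2 := by
  rw [Bool.eq_iff_iff, A_iff, B_iff]

-- ===== VERDICT (by name: the statement is the Claim_ definition above) =====
theorem vecEquals_spec : Claim_equal_vecEquals := by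
  intro v1 v2 _
  unfold Spec_vecEquals
  exact vecEquals_eq_alt v1 v2
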